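-- pv_equiv track=rewrite | github.com/CDMY0417/Tool_MATH | function_tools/function_total/ilmkhs.py | count_factors_of_k
-- ===== SOURCE A (Python) =====
-- def count_factors_of_k(n: int, k: int) -> int:
--     count = 0
--     for i in range(1, n+1):
--         num = i
--         while num % k == 0:
--             num //= k
--             count += 1
--     return count
-- ===== SOURCE B (Python) =====
-- def count_factors_of_k(n: int, k: int) -> int:
--     # Legendre-style sum: total multiplicity of k in 1..n equals sum of n // k**j
--     total = 0
--     p = k
--     while p <= n:
--         total += n // p
--         p *= k
--     return total
-- ===== Notes on version B (the rewrite author's own statement) =====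
-- stated objective: faster
-- what changed: Replaces the per-element valuation loop over 1..n by the Legendre-style geometric sum of n // k**j over powers of k, removing the whole scan of 1..n.
-- outside the precondition, e.g. on count_factors_of_k(4, -2): A returns 3, B returns -2; on count_factors_of_k(-2, -2): A returns 0, B returns 1; on count_factors_of_k(3, 0): A raises ZeroDivisionError, B raises ZeroDivisionError
import Mathlib
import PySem

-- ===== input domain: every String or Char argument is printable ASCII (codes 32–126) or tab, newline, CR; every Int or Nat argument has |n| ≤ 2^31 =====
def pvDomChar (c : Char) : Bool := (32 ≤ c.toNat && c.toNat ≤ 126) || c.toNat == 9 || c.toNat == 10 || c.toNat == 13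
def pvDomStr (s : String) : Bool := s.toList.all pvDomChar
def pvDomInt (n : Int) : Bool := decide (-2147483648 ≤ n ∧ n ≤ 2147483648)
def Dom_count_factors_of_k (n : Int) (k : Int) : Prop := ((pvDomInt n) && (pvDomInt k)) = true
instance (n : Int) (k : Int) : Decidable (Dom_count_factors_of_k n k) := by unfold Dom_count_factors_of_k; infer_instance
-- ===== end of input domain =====

-- B replaces A's per-element valuation scan of 1..n by the Legendre sum Σ_j n // k^j over powers of k (asymptotically faster).

-- ===== PORT A =====
-- inner loop 'while num % k == 0: num //= k; count += 1'; fuel num.natAbs+1 suffices on Pre_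
-- (k ≥ 2 makes each division strictly shrink num, or the range 1..n is empty)
def cfkInnerA : Nat → Int → Int → Int
  | 0, _, _ => 0
  | fuel+1, k, num =>
      if PySem.Int.mod num k = 0 then 1 + cfkInnerA fuel k (PySem.Int.floordiv num k) else 0

def count_factors_of_k (n : Int) (k : Int) : Int :=
  (PySem.List.pyRange 1 (n+1) 1).foldl (fun count i => count + cfkInnerA (i.natAbs + 1) k i) 0

-- ===== PORT B =====
-- loop 'while p <= n: total += n // p; p *= k'; fuel 64 suffices on Dom ∧ Pre_
-- (for k ≥ 2, p at least doubles each iteration and |n| ≤ 2^31; otherwise ≤ 1 iteration runs)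
def cfkLoopB (n k : Int) : Nat → Int → Int → Int
  | 0, total, _ => total
  | fuel+1, total, p =>
      if p ≤ n then cfkLoopB n k fuel (total + PySem.Int.floordiv n p) (p * k) else total

def count_factors_of_k_alt (n : Int) (k : Int) : Int :=
  cfkLoopB n k 64 0 k

-- ===== PRECONDITION & SPEC =====
-- Pre_ excludes k ≤ 1 with n ≥ 1 — there A raises ZeroDivisionError (k = 0), diverges (k = 1),
-- or, for negative k, returns a per-element division count whose value under floor division by a
-- negative divisor is an accident of A's loop that a Legendre sum cannot match — and the
-- defensible corner k = n ≤ 0, where B's loop body runs once on a negative power and the two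
-- disagree. On every other n ≤ 0 both return 0.
def Pre_count_factors_of_k (n : Int) (k : Int) : Prop := 2 ≤ k ∨ (n ≤ 0 ∧ k ≠ n)
instance (n : Int) (k : Int) : Decidable (Pre_count_factors_of_k n k) := by
  unfold Pre_count_factors_of_k; infer_instance

def pvWitness_count_factors_of_k : Int × Int := (12, 2)

def Spec_count_factors_of_k (n : Int) (k : Int) (out : Int) : Prop := out = count_factors_of_k_alt n k
instance (n : Int) (k : Int) (out : Int) : Decidable (Spec_count_factors_of_k n k out) := by
  unfold Spec_count_factors_of_k; infer_instance

-- ===== CLAIM (what is proved, stated in full; the proofs are below) =====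
def Claim_equal_count_factors_of_k : Prop := ∀ (n : Int) (k : Int), Dom_count_factors_of_k n k → Pre_count_factors_of_k n k → Spec_count_factors_of_k n k (count_factors_of_k n k)

-- ===== LEMMAS AND PROOFS =====

-- Nat ghost of A's inner loop (the k-adic valuation computed by repeated division)
def vN (k : Nat) : Nat → Nat → Nat
  | 0, _ => 0
  | fuel+1, i => if i % k = 0 then 1 + vN k fuel (i / k) else 0

-- Nat ghost of B's loop
def bN (n k : Nat) : Nat → Nat → Nat → Nat
  | 0, total, _ => total
  | fuel+1, total, p => if p ≤ n then bN n k fuel (total + n / p) (p * k) else total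

lemma cfkInnerA_cast (k : Nat) :
    ∀ (fuel : Nat) (i : Nat), cfkInnerA fuel (k : Int) (i : Int) = (vN k fuel i : Int) := by
  intro fuel
  induction fuel with
  | zero => intro i; simp [cfkInnerA, vN]
  | succ f ih =>
      intro i
      by_cases h : i % k = 0
      · rw [show cfkInnerA (f+1) (k:Int) (i:Int) = 1 + cfkInnerA f k (PySem.Int.floordiv i k) from
          by simp [cfkInnerA, PySem.Int.mod_natCast, h]]
        rw [PySem.Int.floordiv_natCast, ih, show vN k (f+1) i = 1 + vN k f (i/k) from by simp [vN, h]]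
        push_cast; ring
      · rw [show cfkInnerA (f+1) (k:Int) (i:Int) = 0 from
          by simp only [cfkInnerA, PySem.Int.mod_natCast]
             rw [if_neg]; exact fun hc => h (by exact_mod_cast hc)]
        rw [show vN k (f+1) i = 0 from by simp [vN, h]]
        simp

lemma cfkLoopB_cast (n k : Nat) :
    ∀ (fuel : Nat) (total p : Nat), cfkLoopB (n : Int) (k : Int) fuel (total : Int) (p : Int)
      = (bN n k fuel total p : Int) := by
  intro fuel
  induction fuel with
  | zero => intro total p; simp [cfkLoopB, bN]
  | succ f ih =>
      intro total p
      simp only [cfkLoopB, bN, PySem.Int.floordiv_natCast]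
      by_cases h : p ≤ n
      · rw [if_pos (by exact_mod_cast h), if_pos h, ← Nat.cast_add, ← Nat.cast_mul, ih]
      · rw [if_neg (by exact_mod_cast h), if_neg h]

-- vN with enough fuel is the k-adic valuation: k^v divides i, k^(v+1) does not
lemma vN_spec (k : Nat) (hk : 2 ≤ k) :
    ∀ (fuel i : Nat), 1 ≤ i → i ≤ fuel →
      k ^ (vN k fuel i) ∣ i ∧ ¬ k ^ (vN k fuel i + 1) ∣ i := by
  intro fuel
  induction fuel with
  | zero => intro i h1 h2; omega
  | succ f ih =>
      intro i h1 h2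
      by_cases h : i % k = 0
      · have hdvd : k ∣ i := Nat.dvd_of_mod_eq_zero h
        obtain ⟨q, hq⟩ := hdvd
        have hq1 : 1 ≤ q := by
          rcases Nat.eq_zero_or_pos q with h0 | h0
          · subst h0; simp at hq; omega
          · omega
        have hik : i / k = q := by rw [hq]; exact Nat.mul_div_cancel_left q (by omega)
        have hqf : q ≤ f := by
          have hlt : q < k * q := by nlinarith
          omega
        obtain ⟨hd, hnd⟩ := ih q hq1 (by omega)
        constructor
        · simp only [vN, if_pos h, hik]
          rw [show 1 + vN k f q = vN k f q + 1 by ring, pow_succ, hq, mul_comm k q]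
          exact mul_dvd_mul hd dvd_rfl
        · simp only [vN, if_pos h, hik]
          intro hcon
          apply hnd
          rw [hq, mul_comm k q] at hcon
          rw [show 1 + vN k f q + 1 = (vN k f q + 1) + 1 by ring, pow_succ] at hcon
          exact (mul_dvd_mul_iff_right (show k ≠ 0 by omega)).mp hcon
      · constructor
        · simp [vN, h]
        · simp only [vN, if_neg h, zero_add, pow_one]
          exact fun hc => h (Nat.eq_zero_of_dvd_of_lt hc (by omega) ▸ Nat.mod_eq_zero_of_dvd hc)

-- counting form of the valuation: Σ_{j ∈ [1,J)} [k^j ∣ i] = v, given i < k^J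
lemma count_dvd_eq_v (k i v J : Nat) (hk : 2 ≤ k) (hi : 1 ≤ i)
    (h1 : k ^ v ∣ i) (h2 : ¬ k ^ (v+1) ∣ i) (hJ : i < k ^ J) :
    (∑ j ∈ Finset.Ico 1 J, if k ^ j ∣ i then 1 else 0) = v := by
  have hvJ : v < J := by
    have h3 : k ^ v ≤ i := Nat.le_of_dvd (by omega) h1
    have := lt_of_le_of_lt h3 hJ
    exact (Nat.pow_lt_pow_iff_right (by omega)).mp this
  have hiff : ∀ j, (k ^ j ∣ i) ↔ j ≤ v := by
    intro j
    constructor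
    · intro hd
      by_contra hlt
      exact h2 (dvd_trans (pow_dvd_pow k (by omega)) hd)
    · intro hle
      exact dvd_trans (pow_dvd_pow k hle) h1
  calc (∑ j ∈ Finset.Ico 1 J, if k ^ j ∣ i then 1 else 0)
      = ∑ j ∈ Finset.Ico 1 J, if j ≤ v then 1 else 0 := by
        refine Finset.sum_congr rfl fun j _ => ?_
        simp [hiff j]
    _ = ∑ j ∈ (Finset.Ico 1 J).filter (· ≤ v), 1 := (Finset.sum_filter _ _).symm
    _ = v := by
        rw [show (Finset.Ico 1 J).filter (· ≤ v) = Finset.Ico 1 (v+1) from by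
          ext x; simp [Finset.mem_filter, Finset.mem_Ico]; omega]
        simp

-- B's loop computes the truncated Legendre sum
lemma bN_eq_sum (n k : Nat) (hk : 2 ≤ k) :
    ∀ (fuel a total : Nat),
      bN n k fuel total (k ^ a) = total + ∑ j ∈ Finset.Ico a (a + fuel), n / k ^ j := by
  intro fuel
  induction fuel with
  | zero => intro a total; simp [bN]
  | succ f ih =>
      intro a total
      by_cases h : k ^ a ≤ n
      · rw [show bN n k (f+1) total (k ^ a) = bN n k f (total + n / k ^ a) (k ^ a * k) from
          by simp [bN, h]]
        rw [← pow_succ, ih (a+1)]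
        rw [Finset.sum_eq_sum_Ico_succ_bot (show a < a + (f+1) by omega)]
        rw [show a + 1 + f = a + (f + 1) by ring]
        ring
      · rw [show bN n k (f+1) total (k ^ a) = total from by simp [bN, h]]
        rw [Finset.sum_eq_zero, add_zero]
        intro j hj
        have hja : a ≤ j := (Finset.mem_Ico.mp hj).1
        have : k ^ a ≤ k ^ j := Nat.pow_le_pow_right (by omega) hja
        exact Nat.div_eq_of_lt (by omega)

-- the key identity: Σ_{i=1}^n v_k(i) = Σ_{j=1}^{64} n / k^j  (valid since n < k^65)
lemma legendre (n k : Nat) (hk : 2 ≤ k) (hn : n < k ^ 65) :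
    (∑ i ∈ Finset.Icc 1 n, vN k (i+1) i) = ∑ j ∈ Finset.Ico 1 65, n / k ^ j := by
  have step1 : ∀ i ∈ Finset.Icc 1 n,
      vN k (i+1) i = ∑ j ∈ Finset.Ico 1 65, if k ^ j ∣ i then 1 else 0 := by
    intro i hi
    obtain ⟨hi1, hin⟩ := Finset.mem_Icc.mp hi
    obtain ⟨hd, hnd⟩ := vN_spec k hk (i+1) i hi1 (by omega)
    exact (count_dvd_eq_v k i _ 65 hk hi1 hd hnd (by omega)).symm
  rw [Finset.sum_congr rfl step1, Finset.sum_comm]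
  refine Finset.sum_congr rfl fun j _ => ?_
  rw [show Finset.Icc 1 n = Finset.Ioc 0 n from by ext x; simp; omega]
  rw [← Finset.sum_filter]
  rw [show (∑ _x ∈ (Finset.Ioc 0 n).filter (fun i => k ^ j ∣ i), 1)
      = ((Finset.Ioc 0 n).filter (fun i => k ^ j ∣ i)).card from by simp]
  rw [show (Finset.Ioc 0 n).filter (fun i => k ^ j ∣ i) = {x ∈ Finset.Ioc 0 n | k ^ j ∣ x} from rfl]
  exact Nat.Ioc_filter_dvd_card_eq_div n (k ^ j)

-- A's fold over range(1, n+1) as a Finset sum of valuations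
lemma portA_eq_sum (n k : Nat) :
    count_factors_of_k (n : Int) (k : Int) = ((∑ i ∈ Finset.Icc 1 n, vN k (i+1) i : Nat) : Int) := by
  unfold count_factors_of_k
  rw [PySem.List.foldl_add, PySem.List.pyRange_one, zero_add, List.map_map]
  rw [show (((n : Int) + 1) - 1).toNat = n from by omega]
  have hmap : ∀ j : Nat, (fun i : Int => cfkInnerA (i.natAbs + 1) (k : Int) i) ((fun m : Nat => (1 : Int) + m) j)
      = ((vN k (j+2) (j+1) : Nat) : Int) := by
    intro j
    have h1 : ((1 : Int) + (j : Nat)) = ((j+1 : Nat) : Int) := by push_cast; ring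
    simp only [h1]
    rw [show (((j + 1 : Nat) : Int)).natAbs = j + 1 from by omega]
    exact cfkInnerA_cast k (j+2) (j+1)
  calc ((List.range n).map ((fun i : Int => cfkInnerA (i.natAbs + 1) (k : Int) i) ∘ (fun m : Nat => (1 : Int) + m))).sum
      = ((List.range n).map (fun j => ((vN k (j+2) (j+1) : Nat) : Int))).sum := by
        congr 1; exact List.map_congr_left fun j _ => hmap j
    _ = ∑ j ∈ Finset.range n, ((vN k (j+2) (j+1) : Nat) : Int) := rfl
    _ = ((∑ i ∈ Finset.Icc 1 n, vN k (i+1) i : Nat) : Int) := by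
        push_cast
        rw [show Finset.Icc 1 n = Finset.Ico 1 (n+1) from by ext x; simp]
        rw [Finset.sum_Ico_eq_sum_range]
        refine (Finset.sum_congr (by simp) fun j _ => ?_).symm
        norm_num [show 1 + j + 1 = j + 2 from by omega, show 1 + j = j + 1 from by omega]

lemma cfkLoopB_succ (n k : Int) (f : Nat) (total p : Int) :
    cfkLoopB n k (f+1) total p
      = if p ≤ n then cfkLoopB n k f (total + PySem.Int.floordiv n p) (p * k) else total := rfl

-- n // k = 0 for k < n ≤ 0 (the single loop iteration B can take on negative inputs)
lemma floordiv_zero_of_between (n k : Int) (h1 : k < n) (h2 : n ≤ 0) :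
    PySem.Int.floordiv n k = 0 := by
  have heq := PySem.Int.floordiv_mul_add_mod n k
  have hb := PySem.Int.mod_neg_bounds (a := n) (b := k) (by omega)
  set q := PySem.Int.floordiv n k with hq
  rcases lt_trichotomy q 0 with hlt | he | hgt
  · exfalso; nlinarith [hb.1, hb.2]
  · exact he
  · exfalso; nlinarith [hb.1, hb.2]

-- ===== VERDICT (by name: the statement is the Claim_ definition above) =====
theorem count_factors_of_k_spec : Claim_equal_count_factors_of_k := by
  intro n k hdom hpre
  unfold Spec_count_factors_of_k
  have hd : -2147483648 ≤ n ∧ n ≤ 2147483648 := by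
    simp only [Dom_count_factors_of_k, pvDomInt, Bool.and_eq_true, decide_eq_true_eq] at hdom
    exact hdom.1
  have hp : 2 ≤ k ∨ (n ≤ 0 ∧ k ≠ n) := hpre
  by_cases hn : n ≤ 0
  · -- A returns 0 (empty range)
    have hA : count_factors_of_k n k = 0 := by
      unfold count_factors_of_k
      rw [PySem.List.pyRange_one_eq_nil (by omega)]
      rfl
    have hB : count_factors_of_k_alt n k = 0 := by
      unfold count_factors_of_k_alt
      rw [show (64:Nat) = 63+1 from rfl, cfkLoopB_succ]
      by_cases hkn : k ≤ n
      · have hkn' : k < n := by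
          rcases hp with h2 | ⟨_, hne⟩
          · omega
          · omega
        rw [if_pos hkn, show (63:Nat) = 62+1 from rfl, cfkLoopB_succ]
        rw [if_neg (by nlinarith), floordiv_zero_of_between n k hkn' hn]
        ring
      · rw [if_neg hkn]
    rw [hA, hB]
  · -- n ≥ 1, so 2 ≤ k
    have hk : 2 ≤ k := by
      rcases hp with h2 | ⟨h0, _⟩
      · exact h2
      · omega
    obtain ⟨N, hN⟩ : ∃ N : Nat, (N : Int) = n := ⟨n.toNat, by omega⟩
    obtain ⟨K, hK⟩ : ∃ K : Nat, (K : Int) = k := ⟨k.toNat, by omega⟩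
    have hK2 : 2 ≤ K := by omega
    have hNlt : N < K ^ 65 := by
      have h1 : (2:Nat) ^ 65 ≤ K ^ 65 := Nat.pow_le_pow_left (by omega) 65
      have h2 : (2:Nat) ^ 65 = 36893488147419103232 := by norm_num
      omega
    rw [← hN, ← hK, portA_eq_sum N K]
    unfold count_factors_of_k_alt
    rw [show (0:Int) = ((0:Nat) : Int) from rfl, cfkLoopB_cast N K 64 0 K]
    rw [show bN N K 64 0 K = bN N K 64 0 (K^1) from by rw [pow_one]]
    rw [bN_eq_sum N K hK2 64 1 0]
    rw [legendre N K hK2 hNlt, show 1+64 = 65 from rfl, Nat.zero_add]
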